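-- pv_equiv track=rewrite | github.com/abrie/atl-find-council-member | scraper/main.py | buildContact
-- ===== SOURCE A (Python) =====
-- def buildContact(strings):
--     result = {"Office Location":[],"P":[],"F":[],"E":[],"Committee Assignments":[]}
--     current = False
--     for string in strings:
--         if string in result:
--             current = result[string]
--         elif current != False:
--             current.append(string)
--
--     fromto_mapping = {"Office Location":"office","P":"phone","F":"fax","E":"email","Committee Assignments":"committees"}
--     return {fromto_mapping.get(k, k): v for k, v in result.items() if k in fromto_mapping}
-- ===== SOURCE B (Python) =====
-- LABELS = {"Office Location": "office", "P": "phone", "F": "fax",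
--           "E": "email", "Committee Assignments": "committees"}
--
-- def buildContact(strings):
--     # single reverse pass: accumulate the pending segment (reversed), flush it
--     # into the header's segment list when the header is reached; text before the
--     # first header is simply never flushed.  Each bucket is then its segment
--     # list back in left-to-right order, every segment restored to input order.
--     segs = {"office": [], "phone": [], "fax": [], "email": [], "committees": []}
--     pending = []
--     for s in reversed(strings):
--         if s in LABELS:
--             segs[LABELS[s]].append(pending)
--             pending = []
--         else:
--             pending.append(s)
--     return {k: [x for seg in reversed(v) for x in reversed(seg)] for k, v in segs.items()}
-- ===== Notes on version B (the rewrite author's own statement) =====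
-- stated objective: alternative
-- what changed: A walks forward holding a mutable reference to the bucket of the last header seen and appends each string to it; B walks the list once in reverse, accumulating the pending segment and flushing it into that header's segment list when the header is reached (buckets keyed by the final names), then concatenates each bucket's segments back into input order, so strings before the first header fall out naturally.
import Mathlib
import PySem

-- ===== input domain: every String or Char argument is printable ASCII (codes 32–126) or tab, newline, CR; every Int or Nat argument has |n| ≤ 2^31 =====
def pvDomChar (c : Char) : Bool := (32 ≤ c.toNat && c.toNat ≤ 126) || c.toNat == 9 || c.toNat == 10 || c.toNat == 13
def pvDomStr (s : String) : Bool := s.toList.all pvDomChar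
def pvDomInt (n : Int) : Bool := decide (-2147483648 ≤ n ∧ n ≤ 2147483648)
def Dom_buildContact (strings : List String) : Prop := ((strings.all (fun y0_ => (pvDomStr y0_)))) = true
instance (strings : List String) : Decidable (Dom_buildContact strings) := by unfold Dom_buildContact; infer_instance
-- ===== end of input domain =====

-- B replaces A's forward pass (mutable cursor aliasing the current bucket) by a single reverse
-- pass that flushes each pending segment into its bucket at its header; same cost, different
-- decomposition (objective: alternative).

-- ===== PORT A =====
-- A's `current` is a live reference to one of result's buckets; it is modelled by the
-- bucket's KEY (Option String, none = False); appends go through Dict.modify on that key.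
def pvInitA : PySem.Dict String (List String) :=
  PySem.Dict.ofList [("Office Location", []), ("P", []), ("F", []), ("E", []),
    ("Committee Assignments", [])]

def pvStepA (st : PySem.Dict String (List String) × Option String) (s : String) :
    PySem.Dict String (List String) × Option String :=
  if st.1.contains s then (st.1, some s)
  else
    match st.2 with
    | some c => (st.1.modify c [] (fun v => v ++ [s]), some c)
    | none => st

def pvFromTo : PySem.Dict String String :=
  PySem.Dict.ofList [("Office Location", "office"), ("P", "phone"), ("F", "fax"),
    ("E", "email"), ("Committee Assignments", "committees")]

def buildContact (strings : List String) : List (String × List String) :=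
  -- the final dict comprehension {fromto.get(k,k): v for k,v in result.items() if k in fromto}
  (((strings.foldl pvStepA (pvInitA, none)).1.items.foldl
    (fun (acc : PySem.Dict String (List String)) kv =>
      if pvFromTo.contains kv.1 then acc.insert (pvFromTo.getD kv.1 kv.1) kv.2 else acc)
    PySem.Dict.empty)).items

-- ===== PORT B =====
def pvLabels : PySem.Dict String String :=
  PySem.Dict.ofList [("Office Location", "office"), ("P", "phone"), ("F", "fax"),
    ("E", "email"), ("Committee Assignments", "committees")]

def pvInitB : PySem.Dict String (List (List String)) :=
  PySem.Dict.ofList [("office", []), ("phone", []), ("fax", []), ("email", []),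
    ("committees", [])]

def pvStepB (st : PySem.Dict String (List (List String)) × List String) (s : String) :
    PySem.Dict String (List (List String)) × List String :=
  match pvLabels.get? s with
  | some key => (st.1.modify key [] (fun v => v ++ [st.2]), [])
  | none => (st.1, st.2 ++ [s])

def buildContact_alt (strings : List String) : List (String × List String) :=
  -- the final comprehension {k: [x for seg in reversed(v) for x in reversed(seg)] for k, v in segs.items()}
  (((strings.reverse.foldl pvStepB (pvInitB, [])).1.items.foldl
    (fun (acc : PySem.Dict String (List String)) kv =>
      acc.insert kv.1 (kv.2.reverse.flatMap List.reverse))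
    PySem.Dict.empty)).items

-- ===== PRECONDITION & SPEC =====
def Spec_buildContact (strings : List String) (out : List (String × List String)) : Prop := out = buildContact_alt strings
instance (strings : List String) (out : List (String × List String)) : Decidable (Spec_buildContact strings out) := by unfold Spec_buildContact; infer_instance

-- ===== CLAIM (what is proved, stated in full; the proofs are below) =====
def Claim_equal_buildContact : Prop := ∀ (strings : List String), Dom_buildContact strings → Spec_buildContact strings (buildContact strings)

-- ===== LEMMAS AND PROOFS =====

-- the five header labels
def pvHdrs : List String := ["Office Location", "P", "F", "E", "Committee Assignments"]

-- B's pending segment (leading non-header strings of xs)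
def pvPend : List String → List String
  | [] => []
  | s :: xs => if s ∈ pvHdrs then [] else s :: pvPend xs

-- what B adds to the bucket of header k over xs
def pvAddB : List String → String → List String
  | [], _ => []
  | s :: xs, k =>
      if s ∈ pvHdrs then (if k = s then pvPend xs ++ pvAddB xs k else pvAddB xs k)
      else pvAddB xs k

-- what A adds to the bucket of header k over xs, starting with cursor cur
def pvAddA : List String → Option String → String → List String
  | [], _, _ => []
  | s :: xs, cur, k =>
      if s ∈ pvHdrs then pvAddA xs (some s) k
      else
        match cur with
        | some c => (if k = c then [s] else []) ++ pvAddA xs cur k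
        | none => pvAddA xs cur k

-- A's final cursor
def pvCur : List String → Option String → Option String
  | [], c => c
  | s :: xs, c => pvCur xs (if s ∈ pvHdrs then some s else c)

-- the dict shapes the two loops preserve
def pvDictA (a1 a2 a3 a4 a5 : List String) : PySem.Dict String (List String) :=
  ⟨[("Office Location", a1), ("P", a2), ("F", a3), ("E", a4), ("Committee Assignments", a5)]⟩

def pvDictB (b1 b2 b3 b4 b5 : List (List String)) : PySem.Dict String (List (List String)) :=
  ⟨[("office", b1), ("phone", b2), ("fax", b3), ("email", b4), ("committees", b5)]⟩

-- B's per-header segment lists (reverse order, each segment reversed), read off xs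
def pvSegs : List String → String → List (List String)
  | [], _ => []
  | s :: xs, k =>
      if s ∈ pvHdrs then
        (if k = s then pvSegs xs k ++ [(pvPend xs).reverse] else pvSegs xs k)
      else pvSegs xs k

lemma pv_bridge : ∀ (xs : List String) (cur : Option String) (k : String),
    pvAddA xs cur k =
      (match cur with
       | some c => (if k = c then pvPend xs else []) ++ pvAddB xs k
       | none => pvAddB xs k) := by
  intro xs
  induction xs with
  | nil => intro cur k; cases cur <;> simp [pvAddA, pvAddB, pvPend]
  | cons s xs ih =>
    intro cur k
    by_cases hs : s ∈ pvHdrs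
    · cases cur with
      | none =>
        simp only [pvAddA, pvAddB, if_pos hs, ih (some s) k]
        by_cases hk : k = s <;> simp [hk]
      | some c =>
        simp only [pvAddA, pvAddB, pvPend, if_pos hs, ih (some s) k]
        by_cases hk2 : k = c
        · subst hk2
          by_cases hk : k = s <;> simp [hk]
        · by_cases hk : k = s <;> simp [hk, hk2]
    · cases cur with
      | none => simp [pvAddA, pvAddB, hs, ih]
      | some c =>
        simp only [pvAddA, pvAddB, pvPend, if_neg hs, ih (some c) k]
        by_cases hk : k = c <;> simp [hk]

-- A's loop invariant: the dict keeps exactly the five keys, each bucket grows by pvAddA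
lemma pvA_inv : ∀ (xs : List String) (a1 a2 a3 a4 a5 : List String) (cur : Option String),
    (cur = none ∨ cur = some "Office Location" ∨ cur = some "P" ∨ cur = some "F" ∨
      cur = some "E" ∨ cur = some "Committee Assignments") →
    xs.foldl pvStepA (pvDictA a1 a2 a3 a4 a5, cur) =
      (pvDictA (a1 ++ pvAddA xs cur "Office Location") (a2 ++ pvAddA xs cur "P")
        (a3 ++ pvAddA xs cur "F") (a4 ++ pvAddA xs cur "E")
        (a5 ++ pvAddA xs cur "Committee Assignments"),
       pvCur xs cur) := by
  intro xs
  induction xs with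
  | nil => intro a1 a2 a3 a4 a5 cur _; simp [pvAddA, pvCur]
  | cons s xs ih =>
    intro a1 a2 a3 a4 a5 cur hcur
    by_cases hs : s ∈ pvHdrs
    · -- header: the cursor moves to s, the dict is unchanged
      have hstep : pvStepA (pvDictA a1 a2 a3 a4 a5, cur) s = (pvDictA a1 a2 a3 a4 a5, some s) := by
        rcases (show s = "Office Location" ∨ s = "P" ∨ s = "F" ∨ s = "E" ∨
            s = "Committee Assignments" by simpa [pvHdrs] using hs) with h | h | h | h | h <;>
          subst h <;> simp [pvStepA, pvDictA, PySem.Dict.contains]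
      rw [List.foldl_cons, hstep]
      rcases (show s = "Office Location" ∨ s = "P" ∨ s = "F" ∨ s = "E" ∨
          s = "Committee Assignments" by simpa [pvHdrs] using hs) with h | h | h | h | h <;>
        subst h
      · rw [ih a1 a2 a3 a4 a5 (some "Office Location") (by simp)]
        simp [pvAddA, pvCur, pvHdrs]
      · rw [ih a1 a2 a3 a4 a5 (some "P") (by simp)]
        simp [pvAddA, pvCur, pvHdrs]
      · rw [ih a1 a2 a3 a4 a5 (some "F") (by simp)]
        simp [pvAddA, pvCur, pvHdrs]
      · rw [ih a1 a2 a3 a4 a5 (some "E") (by simp)]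
        simp [pvAddA, pvCur, pvHdrs]
      · rw [ih a1 a2 a3 a4 a5 (some "Committee Assignments") (by simp)]
        simp [pvAddA, pvCur, pvHdrs]
    · -- non-header
      have h1 : ¬ ("Office Location" = s) := fun h => hs (by simp [pvHdrs, h.symm])
      have h2 : ¬ ("P" = s) := fun h => hs (by simp [pvHdrs, h.symm])
      have h3 : ¬ ("F" = s) := fun h => hs (by simp [pvHdrs, h.symm])
      have h4 : ¬ ("E" = s) := fun h => hs (by simp [pvHdrs, h.symm])
      have h5 : ¬ ("Committee Assignments" = s) := fun h => hs (by simp [pvHdrs, h.symm])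
      rw [List.foldl_cons]
      rcases hcur with h | h | h | h | h | h <;> subst h
      · -- cur = none: nothing happens
        have hstep : pvStepA (pvDictA a1 a2 a3 a4 a5, none) s = (pvDictA a1 a2 a3 a4 a5, none) := by
          simp [pvStepA, pvDictA, PySem.Dict.contains, h1, h2, h3, h4, h5]
        rw [hstep, ih a1 a2 a3 a4 a5 none (by simp)]
        simp [pvAddA, pvCur, hs]
      · have hstep : pvStepA (pvDictA a1 a2 a3 a4 a5, some "Office Location") s =
            (pvDictA (a1 ++ [s]) a2 a3 a4 a5, some "Office Location") := by
          simp [pvStepA, pvDictA, PySem.Dict.contains, PySem.Dict.modify, PySem.Dict.insert,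
            PySem.Dict.getD, PySem.Dict.get?, h1, h2, h3, h4, h5]
        rw [hstep, ih (a1 ++ [s]) a2 a3 a4 a5 (some "Office Location") (by simp)]
        simp [pvAddA, pvCur, hs]
      · have hstep : pvStepA (pvDictA a1 a2 a3 a4 a5, some "P") s =
            (pvDictA a1 (a2 ++ [s]) a3 a4 a5, some "P") := by
          simp [pvStepA, pvDictA, PySem.Dict.contains, PySem.Dict.modify, PySem.Dict.insert,
            PySem.Dict.getD, PySem.Dict.get?, h1, h2, h3, h4, h5]
        rw [hstep, ih a1 (a2 ++ [s]) a3 a4 a5 (some "P") (by simp)]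
        simp [pvAddA, pvCur, hs]
      · have hstep : pvStepA (pvDictA a1 a2 a3 a4 a5, some "F") s =
            (pvDictA a1 a2 (a3 ++ [s]) a4 a5, some "F") := by
          simp [pvStepA, pvDictA, PySem.Dict.contains, PySem.Dict.modify, PySem.Dict.insert,
            PySem.Dict.getD, PySem.Dict.get?, h1, h2, h3, h4, h5]
        rw [hstep, ih a1 a2 (a3 ++ [s]) a4 a5 (some "F") (by simp)]
        simp [pvAddA, pvCur, hs]
      · have hstep : pvStepA (pvDictA a1 a2 a3 a4 a5, some "E") s =
            (pvDictA a1 a2 a3 (a4 ++ [s]) a5, some "E") := by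
          simp [pvStepA, pvDictA, PySem.Dict.contains, PySem.Dict.modify, PySem.Dict.insert,
            PySem.Dict.getD, PySem.Dict.get?, h1, h2, h3, h4, h5]
        rw [hstep, ih a1 a2 a3 (a4 ++ [s]) a5 (some "E") (by simp)]
        simp [pvAddA, pvCur, hs]
      · have hstep : pvStepA (pvDictA a1 a2 a3 a4 a5, some "Committee Assignments") s =
            (pvDictA a1 a2 a3 a4 (a5 ++ [s]), some "Committee Assignments") := by
          simp [pvStepA, pvDictA, PySem.Dict.contains, PySem.Dict.modify, PySem.Dict.insert,
            PySem.Dict.getD, PySem.Dict.get?, h1, h2, h3, h4, h5]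
        rw [hstep, ih a1 a2 a3 a4 (a5 ++ [s]) (some "Committee Assignments") (by simp)]
        simp [pvAddA, pvCur, hs]

lemma pvLabels_get?_of_not_mem {s : String} (h : s ∉ pvHdrs) : pvLabels.get? s = none := by
  have h1 : ¬ ("Office Location" = s) := fun hh => h (by simp [pvHdrs, hh.symm])
  have h2 : ¬ ("P" = s) := fun hh => h (by simp [pvHdrs, hh.symm])
  have h3 : ¬ ("F" = s) := fun hh => h (by simp [pvHdrs, hh.symm])
  have h4 : ¬ ("E" = s) := fun hh => h (by simp [pvHdrs, hh.symm])
  have h5 : ¬ ("Committee Assignments" = s) := fun hh => h (by simp [pvHdrs, hh.symm])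
  have e1 : ("Office Location" == s) = false := by simp [h1]
  have e2 : ("P" == s) = false := by simp [h2]
  have e3 : ("F" == s) = false := by simp [h3]
  have e4 : ("E" == s) = false := by simp [h4]
  have e5 : ("Committee Assignments" == s) = false := by simp [h5]
  simp [pvLabels, PySem.Dict.get?, PySem.Dict.ofList, PySem.Dict.update, PySem.Dict.empty,
    PySem.Dict.insert, PySem.Dict.contains, List.find?, e1, e2, e3, e4, e5]

-- B's loop (as a foldr) computes pvSegs bucket-wise and the reversed pvPend as pending
lemma pvB_inv : ∀ (xs : List String),
    xs.foldr (fun s st => pvStepB st s) (pvDictB [] [] [] [] [], []) =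
      (pvDictB (pvSegs xs "Office Location") (pvSegs xs "P") (pvSegs xs "F") (pvSegs xs "E")
        (pvSegs xs "Committee Assignments"),
       (pvPend xs).reverse) := by
  intro xs
  induction xs with
  | nil => simp [pvSegs, pvPend]
  | cons s xs ih =>
    rw [List.foldr_cons, ih]
    by_cases hs : s ∈ pvHdrs
    · rcases (show s = "Office Location" ∨ s = "P" ∨ s = "F" ∨ s = "E" ∨
          s = "Committee Assignments" by simpa [pvHdrs] using hs) with h | h | h | h | h <;>
        subst h <;>
        simp [pvStepB, pvDictB, pvLabels, PySem.Dict.ofList, PySem.Dict.update, PySem.Dict.empty,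
          PySem.Dict.get?, PySem.Dict.insert, PySem.Dict.contains, PySem.Dict.getD,
          PySem.Dict.modify, List.find?, pvSegs, pvPend, pvHdrs]
    · simp [pvStepB, pvLabels_get?_of_not_mem hs, pvSegs, pvPend, hs]

-- flattening B's segment lists (reversed twice) gives exactly pvAddB
lemma pvFlat : ∀ (xs : List String) (k : String),
    ((pvSegs xs k).reverse.flatMap List.reverse) = pvAddB xs k := by
  intro xs
  induction xs with
  | nil => intro k; simp [pvSegs, pvAddB]
  | cons s xs ih =>
    intro k
    by_cases hs : s ∈ pvHdrs
    · by_cases hk : k = s <;> simp [pvSegs, pvAddB, hs, hk, ih]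
    · simp [pvSegs, pvAddB, hs, ih]

-- ===== VERDICT (by name: the statement is the Claim_ definition above) =====
theorem buildContact_spec : Claim_equal_buildContact := by
  intro strings _
  unfold Spec_buildContact buildContact buildContact_alt
  have hb : ∀ k, pvAddA strings none k = pvAddB strings k := fun k => pv_bridge strings none k
  have hA := pvA_inv strings [] [] [] [] [] none (Or.inl rfl)
  have hB := pvB_inv strings
  rw [List.foldl_reverse]
  rw [show pvInitA = pvDictA [] [] [] [] [] from rfl, show pvInitB = pvDictB [] [] [] [] [] from rfl,
    hA, hB]
  simp [pvDictA, pvDictB, pvFromTo, PySem.Dict.ofList, PySem.Dict.update,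
    PySem.Dict.empty, PySem.Dict.contains, PySem.Dict.getD, PySem.Dict.get?, PySem.Dict.insert,
    hb]
  refine ⟨?_, ?_, ?_, ?_, ?_⟩ <;> exact (pvFlat strings _).symm
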